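-- pv_equiv track=rewrite | github.com/Alianger18/The-Future-Data-Scientist | Codes Sample/Branch_1-main/Dictionnary duplicates remover.py | duplicate_remover
-- ===== SOURCE A (Python) =====
-- def duplicate_remover(input_dict):
--     ct=input_dict
--     kies=list(ct.keys())
--     dic_listed=[]
--     for i in range(len(kies)):
--         y=kies[i]
--         x=[ct[y],y]
--         dic_listed.append(x)
--     sorted_list=sorted(dic_listed)
--     sorted_list.append(['index', 'reasons only'])
--     fin=[]
--     for j in range(0,len(sorted_list)-1):
--         x=sorted_list[j][0]
--         y=sorted_list[j+1][0]
--         if x==y: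
--             pass
--         else:
--             fin.append(sorted_list[j])
--     almost=[]
--     for k in range(len(fin)):
--         x=fin[k][1]
--         y=fin[k][0]
--         a=[x,y]
--         almost.append(a)
--     almost=sorted(almost)
--     output_dict={}
--     for l in range(len(almost)):
--         y=almost[l][1]
--         x=almost[l][0]
--         output_dict[x]=y
--     return output_dict
-- ===== SOURCE B (Python) =====
-- def duplicate_remover(input_dict):
--     best = {}
--     for k, v in input_dict.items():
--         if v not in best or best[v] < k:
--             best[v] = k
--     out = {}
--     for k, v in sorted((k, v) for v, k in best.items()):
--         out[k] = v
--     return out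
-- ===== Notes on version B (the rewrite author's own statement) =====
-- stated objective: faster
-- what changed: Replaces A's sort-then-adjacent-scan over value/key pairs (with a sentinel pair appended) and second swap-and-sort pass by a single hash-grouping pass that keeps the maximum key per value, followed by one sort of the deduplicated pairs.
-- intended difference: On dicts whose lexicographically largest value is the string 'index', A's sentinel pair compares equal to the last real entry and A silently drops the entry for value 'index' from its result; B keeps it (with its maximum key), which is the intended deduplication. — e.g. on duplicate_remover([("a", "index")]): A returns [], B returns [("a", "index")]
import Mathlib
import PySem

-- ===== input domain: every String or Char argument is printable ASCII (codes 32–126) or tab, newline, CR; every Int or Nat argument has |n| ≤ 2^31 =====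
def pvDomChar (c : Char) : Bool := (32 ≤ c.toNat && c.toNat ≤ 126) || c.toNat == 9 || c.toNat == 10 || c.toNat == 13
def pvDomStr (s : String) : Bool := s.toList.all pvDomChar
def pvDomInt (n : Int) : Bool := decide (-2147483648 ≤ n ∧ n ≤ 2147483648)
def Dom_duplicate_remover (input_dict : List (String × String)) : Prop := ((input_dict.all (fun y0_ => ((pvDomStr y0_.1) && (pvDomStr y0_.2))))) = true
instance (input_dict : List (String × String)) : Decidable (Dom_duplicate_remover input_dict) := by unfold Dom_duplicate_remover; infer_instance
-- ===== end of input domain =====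

-- B replaces A's sort-then-adjacent-scan (with its appended sentinel pair) by one hash-grouping
-- pass keeping the maximum key per value, then a single sort of the deduplicated pairs instead of
-- two full sorts.

-- ===== PORT A =====
def duplicate_remover (input_dict : List (String × String)) : List (String × String) :=
  let ct := PySem.Dict.ofList input_dict
  let kies := ct.keys
  let dic_listed := kies.foldl (fun acc y => acc ++ [((ct.get? y).getD "", y)]) ([] : List (String × String))
  let sorted_list := PySem.List.sorted2 dic_listed Prod.fst Prod.snd
  let sorted_list := sorted_list ++ [("index", "reasons only")]
  let fin := (PySem.List.pyRange 0 ((sorted_list.length : Int) - 1) 1).foldl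
      (fun acc j =>
        let x := (PySem.List.pyGetD sorted_list j ("", "")).1
        let y := (PySem.List.pyGetD sorted_list (j + 1) ("", "")).1
        if x == y then acc else acc ++ [PySem.List.pyGetD sorted_list j ("", "")])
      ([] : List (String × String))
  let almost := fin.foldl (fun acc p => acc ++ [(p.2, p.1)]) ([] : List (String × String))
  let almost := PySem.List.sorted2 almost Prod.fst Prod.snd
  let output_dict := almost.foldl (fun d p => d.insert p.1 p.2)
      (PySem.Dict.empty : PySem.Dict String String)
  output_dict.items

-- ===== PORT B =====
def duplicate_remover_alt (input_dict : List (String × String)) : List (String × String) :=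
  let best := (PySem.Dict.ofList input_dict).items.foldl
      (fun d p => if !d.contains p.2 || decide (d.getD p.2 "" < p.1) then d.insert p.2 p.1 else d)
      (PySem.Dict.empty : PySem.Dict String String)
  let pairs := PySem.List.sorted2 (best.items.map (fun p => (p.2, p.1))) Prod.fst Prod.snd
  let out := pairs.foldl (fun d p => d.insert p.1 p.2)
      (PySem.Dict.empty : PySem.Dict String String)
  out.items

-- ===== PRECONDITION & SPEC =====
-- On dicts whose lexicographically largest value is the string "index", A's sentinel pair compares
-- equal to the last real entry and A silently drops the entry for value "index" from its result;
-- B keeps that entry (with its maximum key), which is the intended deduplication.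
def D_duplicate_remover (input_dict : List (String × String)) : Prop :=
  "index" ∈ (PySem.Dict.ofList input_dict).values ∧
    ∀ v ∈ (PySem.Dict.ofList input_dict).values, v.toList ≤ "index".toList
instance (input_dict : List (String × String)) : Decidable (D_duplicate_remover input_dict) := by
  unfold D_duplicate_remover; infer_instance

def Spec_duplicate_remover (input_dict : List (String × String)) (out : List (String × String)) : Prop :=
  ¬ D_duplicate_remover input_dict → out = duplicate_remover_alt input_dict
instance (input_dict : List (String × String)) (out : List (String × String)) : Decidable (Spec_duplicate_remover input_dict out) := by unfold Spec_duplicate_remover; infer_instance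

def pvDiffWitness_duplicate_remover : (List (String × String)) := [("a", "index")]
def pvDiffWitnessOut_duplicate_remover : (List (String × String)) × (List (String × String)) :=
  ([], [("a", "index")])

-- ===== CLAIM (what is proved, stated in full; the proofs are below) =====
def Claim_unchanged_duplicate_remover : Prop := ∀ (input_dict : List (String × String)), Dom_duplicate_remover input_dict → Spec_duplicate_remover input_dict (duplicate_remover input_dict)
def Claim_changed_duplicate_remover : Prop := Dom_duplicate_remover (pvDiffWitness_duplicate_remover) ∧ D_duplicate_remover (pvDiffWitness_duplicate_remover) ∧ duplicate_remover (pvDiffWitness_duplicate_remover) = pvDiffWitnessOut_duplicate_remover.1 ∧ duplicate_remover_alt (pvDiffWitness_duplicate_remover) = pvDiffWitnessOut_duplicate_remover.2 ∧ pvDiffWitnessOut_duplicate_remover.1 ≠ pvDiffWitnessOut_duplicate_remover.2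
def Claim_exact_duplicate_remover : Prop := ∀ (input_dict : List (String × String)), Dom_duplicate_remover input_dict → D_duplicate_remover input_dict → duplicate_remover input_dict ≠ duplicate_remover_alt input_dict

-- ===== LEMMAS AND PROOFS =====

-- lexicographic order on (value, key) pairs, as Python compares two-element lists of strings
def pvLexlt (p q : String × String) : Prop := p.1 < q.1 ∨ (p.1 = q.1 ∧ p.2 < q.2)
def pvLexle (p q : String × String) : Prop := p.1 < q.1 ∨ (p.1 = q.1 ∧ p.2 ≤ q.2)

-- the boolean comparator PySem.List.sorted2 _ Prod.fst Prod.snd uses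
def pvLt (p q : String × String) : Bool :=
  decide (p.1 < q.1) || (!decide (q.1 < p.1) && decide (p.2 < q.2))

theorem pvLt_iff (p q : String × String) : pvLt p q = true ↔ pvLexlt p q := by
  simp only [pvLt, pvLexlt, Bool.or_eq_true, Bool.and_eq_true, Bool.not_eq_true',
    decide_eq_true_iff, decide_eq_false_iff_not]
  constructor
  · rintro (h | ⟨h1, h2⟩)
    · exact Or.inl h
    · rcases lt_trichotomy p.1 q.1 with h | h | h
      · exact Or.inl h
      · exact Or.inr ⟨h, h2⟩
      · exact absurd h h1
  · rintro (h | ⟨h1, h2⟩)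
    · exact Or.inl h
    · exact Or.inr ⟨by rw [h1]; exact lt_irrefl _, h2⟩

theorem pvLt_false_iff (p q : String × String) : pvLt p q = false ↔ pvLexle q p := by
  rw [Bool.eq_false_iff, Ne, pvLt_iff]
  constructor
  · intro hn
    rcases lt_trichotomy q.1 p.1 with h | h | h
    · exact Or.inl h
    · exact Or.inr ⟨h, le_of_not_gt fun hc => hn (Or.inr ⟨h.symm, hc⟩)⟩
    · exact absurd (Or.inl h) hn
  · rintro (h | ⟨h1, h2⟩) (h' | ⟨h1', h2'⟩)
    · exact lt_asymm h h'
    · exact absurd h (by rw [h1']; exact lt_irrefl _)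
    · exact absurd h' (by rw [h1]; exact lt_irrefl _)
    · exact absurd h2' (not_lt_of_ge h2)

theorem pvLexle_refl (p : String × String) : pvLexle p p := Or.inr ⟨rfl, le_refl _⟩
theorem pvLexlt_le (p q : String × String) : pvLexlt p q → pvLexle p q := by
  rintro (h | ⟨h1, h2⟩); exacts [Or.inl h, Or.inr ⟨h1, le_of_lt h2⟩]
theorem pvLexle_trans {p q r : String × String} : pvLexle p q → pvLexle q r → pvLexle p r := by
  rintro (h | ⟨h1, h2⟩) (h' | ⟨h1', h2'⟩)
  · exact Or.inl (lt_trans h h')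
  · exact Or.inl (h1' ▸ h)
  · exact Or.inl (h1 ▸ h')
  · exact Or.inr ⟨h1.trans h1', le_trans h2 h2'⟩
theorem pvLexle_antisymm {p q : String × String} : pvLexle p q → pvLexle q p → p = q := by
  rintro (h | ⟨h1, h2⟩) (h' | ⟨h1', h2'⟩)
  · exact absurd h' (lt_asymm h)
  · exact absurd h (by rw [h1']; exact lt_irrefl _)
  · exact absurd h' (by rw [h1]; exact lt_irrefl _)
  · exact Prod.ext h1 (le_antisymm h2 h2')
theorem pvLexle_ne_lt {p q : String × String} : pvLexle p q → p ≠ q → pvLexlt p q := by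
  rintro (h | ⟨h1, h2⟩) hne
  · exact Or.inl h
  · refine Or.inr ⟨h1, lt_of_le_of_ne h2 fun h2e => hne (Prod.ext h1 h2e)⟩
theorem pvLexle_fst {p q : String × String} : pvLexle p q → p.1 ≤ q.1 := by
  rintro (h | ⟨h1, _⟩); exacts [le_of_lt h, le_of_eq h1]

theorem insertBy_eq_cons (before : (String × String) → (String × String) → Bool)
    (x y : String × String) (ys : List (String × String)) :
    PySem.List.insertBy before x (y :: ys) =
      if before x y then x :: y :: ys else y :: PySem.List.insertBy before x ys := by
  simp [PySem.List.insertBy]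

theorem insertBy_pairwise (x : String × String) (l : List (String × String))
    (h : l.Pairwise pvLexle) : (PySem.List.insertBy pvLt x l).Pairwise pvLexle := by
  induction l with
  | nil => simp [PySem.List.insertBy]
  | cons y ys ih =>
    rw [List.pairwise_cons] at h
    obtain ⟨hy, hys⟩ := h
    rw [insertBy_eq_cons]
    by_cases hb : pvLt x y = true
    · rw [if_pos hb]
      have hxy : pvLexle x y := pvLexlt_le _ _ ((pvLt_iff x y).mp hb)
      refine List.Pairwise.cons ?_ (List.Pairwise.cons hy hys)
      intro z hz
      rcases List.mem_cons.mp hz with rfl | hz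
      · exact hxy
      · exact pvLexle_trans hxy (hy z hz)
    · rw [if_neg hb]
      have hyx : pvLexle y x := (pvLt_false_iff x y).mp (Bool.eq_false_iff.mpr hb)
      refine List.Pairwise.cons ?_ (ih hys)
      intro z hz
      rcases (PySem.List.mem_insertBy pvLt x z ys).mp hz with rfl | hz
      · exact hyx
      · exact hy z hz

theorem sorted2_eq_foldl (xs : List (String × String)) :
    PySem.List.sorted2 xs Prod.fst Prod.snd =
      xs.foldl (fun acc x => PySem.List.insertBy pvLt x acc) [] := rfl

theorem foldl_insertBy_pairwise : ∀ (xs acc : List (String × String)),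
    acc.Pairwise pvLexle →
    (xs.foldl (fun acc x => PySem.List.insertBy pvLt x acc) acc).Pairwise pvLexle := by
  intro xs
  induction xs with
  | nil => intro acc h; exact h
  | cons x t ih => intro acc h; exact ih _ (insertBy_pairwise x acc h)

theorem sorted2_pairwise_le (xs : List (String × String)) :
    (PySem.List.sorted2 xs Prod.fst Prod.snd).Pairwise pvLexle := by
  rw [sorted2_eq_foldl]
  exact foldl_insertBy_pairwise xs [] List.Pairwise.nil

theorem perm_pairwise_eq : ∀ {l₁ l₂ : List (String × String)}, l₁.Perm l₂ →
    l₁.Pairwise pvLexle → l₂.Pairwise pvLexle → l₁ = l₂ := by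
  intro l₁
  induction l₁ with
  | nil => intro l₂ h _ _; exact (h.symm.eq_nil).symm
  | cons a t ih =>
    intro l₂ h h₁ h₂
    cases l₂ with
    | nil => exact absurd h.eq_nil (by simp)
    | cons b t₂ =>
      rw [List.pairwise_cons] at h₁ h₂
      have hab : a = b := by
        have hb : b ∈ a :: t := h.mem_iff.mpr List.mem_cons_self
        have ha : a ∈ b :: t₂ := h.mem_iff.mp List.mem_cons_self
        have h1 : pvLexle a b := by
          rcases List.mem_cons.mp hb with rfl | hb
          · exact pvLexle_refl _
          · exact h₁.1 b hb
        have h2 : pvLexle b a := by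
          rcases List.mem_cons.mp ha with rfl | ha
          · exact pvLexle_refl _
          · exact h₂.1 a ha
        exact pvLexle_antisymm h1 h2
      subst hab
      rw [ih h.cons_inv h₁.2 h₂.2]

theorem sorted2_pairwise_lt {xs : List (String × String)} (hn : xs.Nodup) :
    (PySem.List.sorted2 xs Prod.fst Prod.snd).Pairwise pvLexlt := by
  have hnd : (PySem.List.sorted2 xs Prod.fst Prod.snd).Nodup :=
    ((PySem.List.sorted2_perm xs Prod.fst Prod.snd false).nodup_iff).mpr hn
  have hle := sorted2_pairwise_le xs
  exact (hle.and hnd).imp (fun h => pvLexle_ne_lt h.1 h.2)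

theorem sorted2_congr_perm {xs ys : List (String × String)} (h : xs.Perm ys) :
    PySem.List.sorted2 xs Prod.fst Prod.snd = PySem.List.sorted2 ys Prod.fst Prod.snd :=
  perm_pairwise_eq
    (((PySem.List.sorted2_perm xs Prod.fst Prod.snd false).trans h).trans
      (PySem.List.sorted2_perm ys Prod.fst Prod.snd false).symm)
    (sorted2_pairwise_le xs) (sorted2_pairwise_le ys)

-- the adjacent-difference scan of A's second loop, structurally
def scanA : List (String × String) → List (String × String)
  | [] => []
  | [_] => []
  | x :: y :: t => (if x.1 == y.1 then [] else [x]) ++ scanA (y :: t)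

-- keep the last element of each fst-group
def lastGrp : List (String × String) → List (String × String)
  | [] => []
  | [x] => [x]
  | x :: y :: t => (if x.1 == y.1 then [] else [x]) ++ lastGrp (y :: t)

theorem foldl_range_pair {α β : Type} (g : β → α → α → β) (d : α) :
    ∀ (xs : List α) (A : β),
      (List.range (xs.length - 1)).foldl (fun acc j => g acc (xs.getD j d) (xs.getD (j + 1) d)) A =
        (xs.zip xs.tail).foldl (fun acc p => g acc p.1 p.2) A := by
  intro xs
  induction xs with
  | nil => intro A; rfl
  | cons x t ih =>
    cases t with
    | nil => intro A; rfl
    | cons y t' =>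
      intro A
      have hlen : (x :: y :: t').length - 1 = (y :: t').length - 1 + 1 := by
        simp
      rw [hlen, List.range_succ_eq_map, List.foldl_cons, List.foldl_map]
      simp only [List.getD_cons_zero, List.getD_cons_succ]
      exact ih (g A x y)

theorem foldl_zip_eq_scanA : ∀ (L : List (String × String)) (A : List (String × String)),
    (L.zip L.tail).foldl
        (fun acc p => if p.1.1 == p.2.1 then acc else acc ++ [p.1]) A = A ++ scanA L := by
  intro L
  induction L using scanA.induct with
  | case1 => intro A; simp [scanA]
  | case2 x => intro A; simp [scanA]
  | case3 x y t ih =>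
    intro A
    show ((x, y) :: (y :: t).zip t).foldl _ _ = _
    rw [List.foldl_cons, scanA]
    simp only [List.tail_cons] at ih
    by_cases hb : (x.1 == y.1) = true
    · rw [if_pos hb, if_pos hb, List.nil_append]
      exact ih A
    · rw [if_neg hb, if_neg hb]
      have h2 := ih (A ++ [x])
      simpa using h2

theorem scanA_append_sentinel : ∀ (S : List (String × String)),
    (∀ h : S ≠ [], (S.getLast h).1 ≠ "index") →
      scanA (S ++ [("index", "reasons only")]) = lastGrp S := by
  intro S
  induction S using lastGrp.induct with
  | case1 => intro _; rfl
  | case2 x =>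
    intro h
    have hx : (x.1 == "index") = false :=
      beq_eq_false_iff_ne.mpr (h (by simp))
    show (if (x.1 == "index") = true then _ else [x]) ++ scanA [("index", "reasons only")] = [x]
    rw [hx]
    simp [scanA]
  | case3 x y t ih =>
    intro h
    have h' : ∀ hne : (y :: t) ≠ [], ((y :: t).getLast hne).1 ≠ "index" := by
      intro hne
      have := h (by simp)
      rwa [List.getLast_cons hne] at this
    show (if (x.1 == y.1) = true then _ else [x]) ++ scanA ((y :: t) ++ [("index", "reasons only")]) = _
    rw [ih h', lastGrp]

theorem lastGrp_sublist : ∀ (S : List (String × String)), (lastGrp S).Sublist S := by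
  intro S
  induction S using lastGrp.induct with
  | case1 => simp [lastGrp]
  | case2 x => simp [lastGrp]
  | case3 x y t ih =>
    rw [lastGrp]
    by_cases hb : (x.1 == y.1) = true
    · rw [if_pos hb, List.nil_append]
      exact ih.cons x
    · rw [if_neg hb, List.singleton_append]
      exact ih.cons₂ x

theorem mem_lastGrp : ∀ {S : List (String × String)}, S.Pairwise pvLexlt → ∀ p,
    (p ∈ lastGrp S ↔ p ∈ S ∧ ∀ q ∈ S, q.1 = p.1 → q.2 ≤ p.2) := by
  intro S
  induction S using lastGrp.induct with
  | case1 => intro _ p; simp [lastGrp]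
  | case2 x =>
    intro _ p
    show p ∈ [x] ↔ _
    constructor
    · intro hmem
      refine ⟨hmem, ?_⟩
      intro q hq _
      rcases List.mem_singleton.mp hq with rfl
      rcases List.mem_singleton.mp hmem with rfl
      exact le_refl _
    · rintro ⟨hmem, _⟩
      exact hmem
  | case3 x y t ih =>
    intro hp p
    rw [List.pairwise_cons] at hp
    obtain ⟨hx, hyt⟩ := hp
    have ihp := ih hyt
    by_cases hb : (x.1 == y.1) = true
    · have hbe : x.1 = y.1 := beq_iff_eq.mp hb
      rw [lastGrp, if_pos hb, List.nil_append, ihp p]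
      constructor
      · rintro ⟨hmem, hcond⟩
        refine ⟨List.mem_cons_of_mem x hmem, ?_⟩
        intro q hq hq1
        rcases List.mem_cons.mp hq with rfl | hq
        · rcases hx p hmem with hlt | ⟨_, hlt⟩
          · exact absurd hq1 (ne_of_lt hlt)
          · exact le_of_lt hlt
        · exact hcond q hq hq1
      · rintro ⟨hmem, hcond⟩
        rcases List.mem_cons.mp hmem with rfl | hmem
        · have hy2 : y.2 ≤ p.2 :=
            hcond y (List.mem_cons_of_mem _ List.mem_cons_self) hbe.symm
          rcases hx y List.mem_cons_self with hlt | ⟨_, hlt⟩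
          · exact absurd hbe (ne_of_lt hlt)
          · exact absurd hy2 (not_le_of_gt hlt)
        · exact ⟨hmem, fun q hq hq1 => hcond q (List.mem_cons_of_mem x hq) hq1⟩
    · have hbe : x.1 ≠ y.1 := by simpa using hb
      have hxy1 : x.1 < y.1 := by
        rcases hx y List.mem_cons_self with h | ⟨h, _⟩
        · exact h
        · exact absurd h hbe
      have hy' : ∀ w ∈ t, pvLexlt y w := (List.pairwise_cons.mp hyt).1
      have hzgt : ∀ z ∈ y :: t, x.1 < z.1 := by
        intro z hz
        rcases List.mem_cons.mp hz with rfl | hz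
        · exact hxy1
        · exact lt_of_lt_of_le hxy1 (pvLexle_fst (pvLexlt_le _ _ (hy' z hz)))
      rw [lastGrp, if_neg hb, List.singleton_append]
      constructor
      · intro hmem
        rcases List.mem_cons.mp hmem with rfl | hmem
        · refine ⟨List.mem_cons_self, ?_⟩
          intro q hq hq1
          rcases List.mem_cons.mp hq with rfl | hq
          · exact le_refl _
          · exact absurd hq1.symm (ne_of_lt (hzgt q hq))
        · obtain ⟨hm, hcond⟩ := (ihp p).mp hmem
          refine ⟨List.mem_cons_of_mem x hm, ?_⟩
          intro q hq hq1
          rcases List.mem_cons.mp hq with rfl | hq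
          · exact absurd hq1 (ne_of_lt (hzgt p hm))
          · exact hcond q hq hq1
      · rintro ⟨hmem, hcond⟩
        rcases List.mem_cons.mp hmem with rfl | hmem
        · exact List.mem_cons_self
        · exact List.mem_cons_of_mem x ((ihp p).mpr
            ⟨hmem, fun q hq hq1 => hcond q (List.mem_cons_of_mem x hq) hq1⟩)

theorem pairwise_le_getLast : ∀ {S : List (String × String)}, S.Pairwise pvLexle →
    ∀ (h : S ≠ []) q, q ∈ S → pvLexle q (S.getLast h) := by
  intro S
  induction S using lastGrp.induct with
  | case1 => intro _ h; exact absurd rfl h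
  | case2 x =>
    intro _ _ q hq
    rcases List.mem_singleton.mp hq with rfl
    exact pvLexle_refl _
  | case3 x y t ih =>
    intro hp hne q hq
    rw [List.pairwise_cons] at hp
    obtain ⟨hx, hyt⟩ := hp
    rw [List.getLast_cons (by simp : (y :: t) ≠ [])]
    rcases List.mem_cons.mp hq with rfl | hq
    · exact hx _ (List.getLast_mem _)
    · exact ih hyt (by simp) q hq

-- B side: the option-valued running maximum underlying the `best` dict
def pvG (v : String) (o : Option String) (p : String × String) : Option String :=
  if p.2 = v then
    (match o with
      | none => some p.1
      | some m => if m < p.1 then some p.1 else some m)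
  else o

theorem get?_foldl_stepB : ∀ (l : List (String × String)) (d : PySem.Dict String String) (v : String),
    (l.foldl (fun d p => if !d.contains p.2 || decide (d.getD p.2 "" < p.1) then d.insert p.2 p.1 else d) d).get? v
      = l.foldl (pvG v) (d.get? v) := by
  intro l
  induction l with
  | nil => intro d v; rfl
  | cons p t ih =>
    intro d v
    rw [List.foldl_cons, List.foldl_cons, ih]
    congr 1
    by_cases hv : p.2 = v
    · subst hv
      cases ho : d.get? p.2 with
      | none =>
        have hc : d.contains p.2 = false := by
          rw [PySem.Dict.contains_eq_isSome_get?, ho]; rfl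
        simp [pvG, hc, PySem.Dict.get?_insert_self]
      | some m =>
        have hc : d.contains p.2 = true := by
          rw [PySem.Dict.contains_eq_isSome_get?, ho]; rfl
        have hgd : d.getD p.2 "" = m := by
          rw [PySem.Dict.getD_eq_get?_getD, ho]; rfl
        by_cases hm : m < p.1
        · simp [pvG, hc, hgd, hm, PySem.Dict.get?_insert_self]
        · simp [pvG, hc, hgd, hm, ho]
    · have hne : v ≠ p.2 := fun h => hv h.symm
      by_cases hcond : (!d.contains p.2 || decide (d.getD p.2 "" < p.1)) = true
      · rw [if_pos hcond, PySem.Dict.get?_insert_of_ne d p.1 hne]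
        simp [pvG, hv]
      · rw [if_neg hcond]
        simp [pvG, hv]

theorem foldl_pvG_eq_some : ∀ (v : String) (l : List (String × String)) (o : Option String) (k : String),
    (l.foldl (pvG v) o = some k ↔
      (((k, v) ∈ l ∨ o = some k) ∧ (∀ k', (k', v) ∈ l → k' ≤ k) ∧ (∀ m, o = some m → m ≤ k))) := by
  intro v l
  induction l with
  | nil =>
    intro o k
    rw [List.foldl_nil]
    constructor
    · intro h
      refine ⟨Or.inr h, ?_, ?_⟩
      · intro k' hk'; exact absurd hk' (by simp)
      · intro m hm
        rw [h] at hm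
        exact le_of_eq (Option.some.inj hm.symm)
    · rintro ⟨h1, _, _⟩
      rcases h1 with h | h
      · exact absurd h (by simp)
      · exact h
  | cons p t ih =>
    intro o k
    rw [List.foldl_cons, ih (pvG v o p) k]
    by_cases hv : p.2 = v
    · subst hv
      have hpe : ∀ z : String, ((z, p.2) = p) ↔ z = p.1 := by
        intro z; rw [Prod.ext_iff]; simp
      cases o with
      | none =>
        have hg : pvG p.2 (none : Option String) p = some p.1 := by simp [pvG]
        rw [hg]
        simp only [List.mem_cons, hpe, Option.some.injEq, forall_eq', reduceCtorEq,
          false_implies, forall_const, and_true, forall_eq_or_imp]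
        constructor
        · rintro ⟨h1, h2, h3⟩
          exact ⟨by tauto, h3, h2⟩
        · rintro ⟨h1, h2, h3⟩
          exact ⟨by tauto, h3, h2⟩
      | some m =>
        by_cases hm : m < p.1
        · have hg : pvG p.2 (some m) p = some p.1 := by simp [pvG, hm]
          rw [hg]
          simp only [List.mem_cons, hpe, Option.some.injEq, forall_eq', forall_eq_or_imp]
          constructor
          · rintro ⟨h1, h2, h3⟩
            exact ⟨by tauto, ⟨h3, h2⟩, le_of_lt (lt_of_lt_of_le hm h3)⟩
          · rintro ⟨h1, ⟨h2, h3⟩, h4⟩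
            refine ⟨?_, h3, h2⟩
            rcases h1 with (h | h) | h
            · exact Or.inr h.symm
            · exact Or.inl h
            · exact absurd (h ▸ (lt_of_lt_of_le hm h2)) (lt_irrefl _)
        · have hpm : p.1 ≤ m := le_of_not_gt hm
          have hg : pvG p.2 (some m) p = some m := by simp [pvG, hm]
          rw [hg]
          simp only [List.mem_cons, hpe, Option.some.injEq, forall_eq', forall_eq_or_imp]
          constructor
          · rintro ⟨h1, h2, h3⟩
            exact ⟨by tauto, ⟨le_trans hpm h3, h2⟩, h3⟩
          · rintro ⟨h1, ⟨h2, h3⟩, h4⟩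
            refine ⟨?_, h3, h4⟩
            rcases h1 with (h | h) | h
            · exact Or.inr (le_antisymm h4 ((le_of_eq h).trans hpm))
            · exact Or.inl h
            · exact Or.inr h
    · have hpe : ∀ z : String, ((z, v) = p) ↔ False := by
        intro z
        rw [Prod.ext_iff]
        simp only [iff_false, not_and]
        intro _ hvv
        exact hv hvv.symm
      have hg : pvG v o p = o := by simp [pvG, hv]
      rw [hg]
      simp only [List.mem_cons, hpe, false_or]

theorem nodup_keys_foldl_stepB : ∀ (l : List (String × String)) (d : PySem.Dict String String),
    d.keys.Nodup →
    ((l.foldl (fun d p => if !d.contains p.2 || decide (d.getD p.2 "" < p.1) then d.insert p.2 p.1 else d) d).keys).Nodup := by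
  intro l
  induction l with
  | nil => intro d h; exact h
  | cons p t ih =>
    intro d h
    rw [List.foldl_cons]
    apply ih
    by_cases hcond : (!d.contains p.2 || decide (d.getD p.2 "" < p.1)) = true
    · rw [if_pos hcond]
      exact PySem.Dict.nodup_keys_insert d p.2 p.1 h
    · rw [if_neg hcond]
      exact h

theorem mem_map_swap (l : List (String × String)) (a b : String) :
    ((a, b) ∈ l.map (fun p => (p.2, p.1))) ↔ (b, a) ∈ l := by
  rw [List.mem_map]
  constructor
  · rintro ⟨p, hp, he⟩
    have h1 : p.2 = a := congrArg Prod.fst he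
    have h2 : p.1 = b := congrArg Prod.snd he
    rw [← h1, ← h2]
    exact hp
  · intro h
    exact ⟨(b, a), h, rfl⟩

theorem mem_bestd (items : List (String × String)) (v k : String) :
    ((v, k) ∈ (items.foldl
        (fun d p => if !d.contains p.2 || decide (d.getD p.2 "" < p.1) then d.insert p.2 p.1 else d)
        (PySem.Dict.empty : PySem.Dict String String)).items
      ↔ ((k, v) ∈ items ∧ ∀ k', (k', v) ∈ items → k' ≤ k)) := by
  have hbk : ((items.foldl
      (fun d p => if !d.contains p.2 || decide (d.getD p.2 "" < p.1) then d.insert p.2 p.1 else d)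
      (PySem.Dict.empty : PySem.Dict String String)).keys).Nodup :=
    nodup_keys_foldl_stepB items _ (by simp [PySem.Dict.keys, PySem.Dict.empty])
  rw [← PySem.Dict.get?_eq_some_iff_mem_items _ _ _ hbk, get?_foldl_stepB items _ v]
  have he : (PySem.Dict.empty : PySem.Dict String String).get? v = none := by
    simp [PySem.Dict.get?, PySem.Dict.empty]
  rw [he, foldl_pvG_eq_some v items none k]
  constructor
  · rintro ⟨h1, h2, _⟩
    rcases h1 with h | h
    · exact ⟨h, h2⟩
    · exact absurd h (by simp)
  · rintro ⟨h1, h2⟩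
    exact ⟨Or.inl h1, h2, by rintro m ⟨⟩⟩

theorem swap_injective : Function.Injective (fun p : String × String => (p.2, p.1)) := by
  intro a b h
  have h1 : a.2 = b.2 := congrArg Prod.fst h
  have h2 : a.1 = b.1 := congrArg Prod.snd h
  exact Prod.ext h2 h1

theorem scan_loop (L : List (String × String)) :
    (PySem.List.pyRange 0 ((L.length : Int) - 1) 1).foldl
      (fun acc j => if ((PySem.List.pyGetD L j ("", "")).1 == (PySem.List.pyGetD L (j + 1) ("", "")).1) = true
        then acc else acc ++ [PySem.List.pyGetD L j ("", "")]) [] = scanA L := by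
  rw [PySem.List.pyRange_one, List.foldl_map]
  have hn : ((L.length : Int) - 1 - 0).toNat = L.length - 1 := by omega
  rw [hn]
  simp only [zero_add, ← Nat.cast_add_one, PySem.List.pyGetD_natCast]
  rw [foldl_range_pair (fun acc x y => if (x.1 == y.1) = true then acc else acc ++ [x]) ("", "") L []]
  rw [foldl_zip_eq_scanA L []]
  rw [List.nil_append]

theorem main_eq (l : List (String × String)) (hnd : ¬ D_duplicate_remover l) :
    duplicate_remover l = duplicate_remover_alt l := by
  have hk : (PySem.Dict.ofList l).keys.Nodup := PySem.Dict.nodup_keys_ofList l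
  have hdl : (PySem.Dict.ofList l).keys.foldl
      (fun acc y => acc ++ [(((PySem.Dict.ofList l).get? y).getD "", y)]) [] =
      ((PySem.Dict.ofList l).items).map (fun p => (p.2, p.1)) := by
    rw [PySem.List.foldl_append_singleton_eq_map, List.nil_append,
      PySem.Dict.items_eq_map_keys _ hk "", List.map_map]
    apply List.map_congr_left
    intro y _
    simp [PySem.Dict.getD_eq_get?_getD]
  simp only [duplicate_remover, duplicate_remover_alt, hdl]
  rw [scan_loop]
  set items := (PySem.Dict.ofList l).items with hitems_def
  set pairs := items.map (fun p => (p.2, p.1)) with hpairs_def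
  set S := PySem.List.sorted2 pairs Prod.fst Prod.snd with hS_def
  have hSperm : S.Perm pairs := PySem.List.sorted2_perm pairs Prod.fst Prod.snd false
  have hitems_nodup : items.Nodup := List.Nodup.of_map Prod.fst hk
  have hpairs_nodup : pairs.Nodup := hitems_nodup.map swap_injective
  have hS_nodup : S.Nodup := hSperm.nodup_iff.mpr hpairs_nodup
  have hSlt : S.Pairwise pvLexlt := sorted2_pairwise_lt hpairs_nodup
  -- outside D_, the sentinel never swallows the last element of S
  have hlastne : ∀ h : S ≠ [], (S.getLast h).1 ≠ "index" := by
    intro h hidx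
    apply hnd
    have hlmem : S.getLast h ∈ S := List.getLast_mem h
    have hlpairs : S.getLast h ∈ pairs := hSperm.mem_iff.mp hlmem
    have hlitems : ((S.getLast h).2, (S.getLast h).1) ∈ items :=
      (mem_map_swap items (S.getLast h).1 (S.getLast h).2).mp (by rw [Prod.mk.eta]; exact hlpairs)
    constructor
    · show "index" ∈ (PySem.Dict.ofList l).values
      have : (S.getLast h).1 ∈ items.map Prod.snd :=
        List.mem_map.mpr ⟨_, hlitems, rfl⟩
      rw [hidx] at this
      exact this
    · intro v hv
      have hv' : v ∈ items.map Prod.snd := hv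
      obtain ⟨p, hp, hpv⟩ := List.mem_map.mp hv'
      have hppairs : (p.2, p.1) ∈ pairs := List.mem_map.mpr ⟨p, hp, rfl⟩
      have hpS : (p.2, p.1) ∈ S := hSperm.mem_iff.mpr hppairs
      have hle := pairwise_le_getLast (hSlt.imp (fun h => pvLexlt_le _ _ h)) h _ hpS
      have : v ≤ (S.getLast h).1 := by
        rw [← hpv]
        exact pvLexle_fst hle
      rw [hidx] at this
      rw [← String.le_iff_toList_le]
      exact this
  rw [scanA_append_sentinel S hlastne]
  rw [PySem.List.foldl_append_singleton_eq_map, List.nil_append]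
  -- the two sorted deduplicated pair lists are permutations of each other
  have hbest_items_nodup : ((items.foldl
      (fun d p => if !d.contains p.2 || decide (d.getD p.2 "" < p.1) then d.insert p.2 p.1 else d)
      (PySem.Dict.empty : PySem.Dict String String)).items).Nodup :=
    List.Nodup.of_map Prod.fst
      (nodup_keys_foldl_stepB items _ (by simp [PySem.Dict.keys, PySem.Dict.empty]))
  have hlg_nodup : (lastGrp S).Nodup := hS_nodup.sublist (lastGrp_sublist S)
  have hperm : ((lastGrp S).map (fun p => (p.2, p.1))).Perm
      (((items.foldl
        (fun d p => if !d.contains p.2 || decide (d.getD p.2 "" < p.1) then d.insert p.2 p.1 else d)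
        (PySem.Dict.empty : PySem.Dict String String)).items).map (fun p => (p.2, p.1))) := by
    rw [List.perm_ext_iff_of_nodup (hlg_nodup.map swap_injective)
      (hbest_items_nodup.map swap_injective)]
    rintro ⟨a, b⟩
    rw [mem_map_swap, mem_map_swap]
    rw [mem_lastGrp hSlt (b, a), mem_bestd items b a]
    constructor
    · rintro ⟨hmem, hcond⟩
      have hit : (a, b) ∈ items :=
        (mem_map_swap items b a).mp (hSperm.mem_iff.mp hmem)
      refine ⟨hit, ?_⟩
      intro k' hk'
      have hp : (b, k') ∈ pairs := (mem_map_swap items b k').mpr hk'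
      exact hcond _ (hSperm.mem_iff.mpr hp) rfl
    · rintro ⟨hit, hcond⟩
      have hp : (b, a) ∈ pairs := (mem_map_swap items b a).mpr hit
      refine ⟨hSperm.mem_iff.mpr hp, ?_⟩
      intro q hq hq1
      have hqi : (q.2, q.1) ∈ items :=
        (mem_map_swap items q.1 q.2).mp (by rw [Prod.mk.eta]; exact hSperm.mem_iff.mp hq)
      rw [hq1] at hqi
      exact hcond q.2 hqi
  rw [sorted2_congr_perm hperm]

theorem out_items (L : List (String × String)) (hn : (L.map Prod.fst).Nodup) :
    (L.foldl (fun d p => d.insert p.1 p.2) (PySem.Dict.empty : PySem.Dict String String)).items = L := by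
  have h := PySem.Dict.items_foldl_insert_fresh L Prod.fst Prod.snd
    (PySem.Dict.empty : PySem.Dict String String)
    (fun a _ => PySem.Dict.contains_empty _) hn
  simpa using h

theorem values_foldl_insert : ∀ (L : List (String × String)) (d : PySem.Dict String String)
    (w : String), w ∈ (L.foldl (fun d p => d.insert p.1 p.2) d).values →
      w ∈ d.values ∨ w ∈ L.map Prod.snd := by
  intro L
  induction L with
  | nil => intro d w h; exact Or.inl h
  | cons p t ih =>
    intro d w h
    rw [List.foldl_cons] at h
    rcases ih (d.insert p.1 p.2) w h with h' | h'
    · rcases PySem.Dict.mem_values_insert d p.1 p.2 w h' with h'' | h''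
      · exact Or.inr (by rw [h'']; exact List.mem_map.mpr ⟨p, List.mem_cons_self, rfl⟩)
      · exact Or.inl h''
    · exact Or.inr (List.mem_map.mpr
        (by obtain ⟨q, hq, hqe⟩ := List.mem_map.mp h'; exact ⟨q, List.mem_cons_of_mem p hq, hqe⟩))

theorem scanA_no_top (t : String) : ∀ (L : List (String × String)),
    L.Pairwise (fun a b => a.1 ≤ b.1) → (∀ q ∈ L, q.1 ≤ t) →
      ∀ p ∈ scanA L, p.1 ≠ t := by
  intro L
  induction L using scanA.induct with
  | case1 => intro _ _ p hp; exact absurd hp (by simp [scanA])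
  | case2 x => intro _ _ p hp; exact absurd hp (by simp [scanA])
  | case3 x y rest ih =>
    intro hpw htop p hp
    rw [List.pairwise_cons] at hpw
    obtain ⟨hx, hrest⟩ := hpw
    rw [scanA] at hp
    rcases List.mem_append.mp hp with hp | hp
    · by_cases hb : (x.1 == y.1) = true
      · rw [if_pos hb] at hp
        exact absurd hp (by simp)
      · rw [if_neg hb] at hp
        rcases List.mem_singleton.mp hp with rfl
        intro hpt
        have h1 : p.1 ≤ y.1 := hx y List.mem_cons_self
        have h2 : y.1 ≤ t := htop y (List.mem_cons_of_mem _ List.mem_cons_self)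
        have : y.1 = p.1 := le_antisymm (hpt ▸ h2) h1
        exact hb (by rw [this]; simp)
    · exact ih hrest (fun q hq => htop q (List.mem_cons_of_mem x hq)) p hp

theorem main_ne (l : List (String × String)) (hd : D_duplicate_remover l) :
    duplicate_remover l ≠ duplicate_remover_alt l := by
  obtain ⟨hidx, hmaxL⟩ := hd
  have hmax : ∀ v ∈ (PySem.Dict.ofList l).values, v ≤ "index" := fun v hv =>
    String.le_iff_toList_le.mpr (hmaxL v hv)
  have hk : (PySem.Dict.ofList l).keys.Nodup := PySem.Dict.nodup_keys_ofList l
  set items := (PySem.Dict.ofList l).items with hitems_def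
  have hvals : (PySem.Dict.ofList l).values = items.map Prod.snd := rfl
  -- the maximal key carrying value "index"
  have hKne : (items.filter (fun p => p.2 == "index")).map Prod.fst ≠ [] := by
    rw [hvals] at hidx
    obtain ⟨p0, hp0, hp0v⟩ := List.mem_map.mp hidx
    have hmem : p0.1 ∈ (items.filter (fun p => p.2 == "index")).map Prod.fst :=
      List.mem_map.mpr ⟨p0, List.mem_filter.mpr ⟨hp0, by simp [hp0v]⟩, rfl⟩
    exact List.ne_nil_of_mem hmem
  obtain ⟨kstar, hkstar⟩ : ∃ kstar, PySem.List.max?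
      ((items.filter (fun p => p.2 == "index")).map Prod.fst) (fun x => x) = some kstar := by
    cases hmx : PySem.List.max? ((items.filter (fun p => p.2 == "index")).map Prod.fst) (fun x => x) with
    | none => exact absurd ((PySem.List.max?_eq_none_iff _ _).mp hmx) hKne
    | some m => exact ⟨m, rfl⟩
  have hkmem : (kstar, "index") ∈ items := by
    have hm := PySem.List.max?_mem hkstar
    obtain ⟨p, hp, hpe⟩ := List.mem_map.mp hm
    obtain ⟨hpi, hpv⟩ := List.mem_filter.mp hp
    have hpv' : p.2 = "index" := by simpa using hpv
    have : p = (kstar, "index") := Prod.ext hpe hpv'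
    exact this ▸ hpi
  have hkmax : ∀ k', (k', "index") ∈ items → k' ≤ kstar := by
    intro k' hk'
    have : k' ∈ (items.filter (fun p => p.2 == "index")).map Prod.fst :=
      List.mem_map.mpr ⟨(k', "index"), List.mem_filter.mpr ⟨hk', by simp⟩, rfl⟩
    exact PySem.List.max?_isMax hkstar k' this
  have hbest : ("index", kstar) ∈ (items.foldl
      (fun d p => if !d.contains p.2 || decide (d.getD p.2 "" < p.1) then d.insert p.2 p.1 else d)
      (PySem.Dict.empty : PySem.Dict String String)).items :=
    (mem_bestd items "index" kstar).mpr ⟨hkmem, hkmax⟩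
  -- B's output contains the pair (kstar, "index")
  have hbest_items_nodup : ((items.foldl
      (fun d p => if !d.contains p.2 || decide (d.getD p.2 "" < p.1) then d.insert p.2 p.1 else d)
      (PySem.Dict.empty : PySem.Dict String String)).items).Nodup :=
    List.Nodup.of_map Prod.fst
      (nodup_keys_foldl_stepB items _ (by simp [PySem.Dict.keys, PySem.Dict.empty]))
  have hbest_values_nodup : (((items.foldl
      (fun d p => if !d.contains p.2 || decide (d.getD p.2 "" < p.1) then d.insert p.2 p.1 else d)
      (PySem.Dict.empty : PySem.Dict String String)).items).map Prod.snd).Nodup := by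
    apply List.Nodup.map_on _ hbest_items_nodup
    intro x hx y hy hxy
    obtain ⟨hxi, _⟩ := (mem_bestd items x.1 x.2).mp (by rw [Prod.mk.eta]; exact hx)
    obtain ⟨hyi, _⟩ := (mem_bestd items y.1 y.2).mp (by rw [Prod.mk.eta]; exact hy)
    rw [hxy] at hxi
    rw [hitems_def] at hxi hyi
    have h1 := PySem.Dict.get?_of_mem_items (PySem.Dict.ofList l) hxi hk
    have h2 := PySem.Dict.get?_of_mem_items (PySem.Dict.ofList l) hyi hk
    rw [h1] at h2
    exact Prod.ext (Option.some.inj h2) hxy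
  have hBmem : (kstar, "index") ∈ duplicate_remover_alt l := by
    simp only [duplicate_remover_alt]
    rw [← hitems_def]
    rw [out_items]
    · rw [(PySem.List.sorted2_perm _ Prod.fst Prod.snd false).mem_iff, mem_map_swap]
      exact hbest
    · have hperm := (PySem.List.sorted2_perm (((items.foldl
          (fun d p => if !d.contains p.2 || decide (d.getD p.2 "" < p.1) then d.insert p.2 p.1 else d)
          (PySem.Dict.empty : PySem.Dict String String)).items).map (fun p => (p.2, p.1)))
          Prod.fst Prod.snd false).map Prod.fst
      rw [(hperm.nodup_iff), List.map_map]
      exact hbest_values_nodup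
  -- A's output carries no pair with value "index"
  intro heq
  have hdl : (PySem.Dict.ofList l).keys.foldl
      (fun acc y => acc ++ [(((PySem.Dict.ofList l).get? y).getD "", y)]) [] =
      ((PySem.Dict.ofList l).items).map (fun p => (p.2, p.1)) := by
    rw [PySem.List.foldl_append_singleton_eq_map, List.nil_append,
      PySem.Dict.items_eq_map_keys _ hk "", List.map_map]
    apply List.map_congr_left
    intro y _
    simp [PySem.Dict.getD_eq_get?_getD]
  have hA : duplicate_remover l = ((PySem.List.sorted2
      ((scanA ((PySem.List.sorted2 (items.map (fun p => (p.2, p.1))) Prod.fst Prod.snd) ++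
        [("index", "reasons only")])).map (fun p => (p.2, p.1))) Prod.fst Prod.snd).foldl
      (fun d p => d.insert p.1 p.2) (PySem.Dict.empty : PySem.Dict String String)).items := by
    simp only [duplicate_remover, hdl]
    rw [scan_loop, PySem.List.foldl_append_singleton_eq_map, List.nil_append, ← hitems_def]
  set S := PySem.List.sorted2 (items.map (fun p => (p.2, p.1))) Prod.fst Prod.snd with hS_def
  have hSperm : S.Perm (items.map (fun p => (p.2, p.1))) :=
    PySem.List.sorted2_perm _ Prod.fst Prod.snd false
  have hStop : ∀ q ∈ S, q.1 ≤ "index" := by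
    intro q hq
    have hqp := hSperm.mem_iff.mp hq
    obtain ⟨p, hp, hpe⟩ := List.mem_map.mp hqp
    apply hmax
    rw [hvals]
    exact List.mem_map.mpr ⟨p, hp, by rw [← hpe]⟩
  have hscan_ne : ∀ p ∈ scanA (S ++ [("index", "reasons only")]), p.1 ≠ "index" := by
    apply scanA_no_top
    · rw [List.pairwise_append]
      refine ⟨(sorted2_pairwise_le _).imp (fun h => pvLexle_fst h), by simp, ?_⟩
      intro a ha b hb
      rcases List.mem_singleton.mp hb with rfl
      exact hStop a ha
    · intro q hq
      rcases List.mem_append.mp hq with hq | hq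
      · exact hStop q hq
      · rcases List.mem_singleton.mp hq with rfl
        exact le_refl _
  have hAmem : (kstar, "index") ∈ duplicate_remover l := heq ▸ hBmem
  rw [hA] at hAmem
  have hAval : ("index" : String) ∈ ((PySem.List.sorted2
      ((scanA (S ++ [("index", "reasons only")])).map (fun p => (p.2, p.1))) Prod.fst Prod.snd).foldl
      (fun d p => d.insert p.1 p.2) (PySem.Dict.empty : PySem.Dict String String)).values :=
    List.mem_map.mpr ⟨(kstar, "index"), hAmem, rfl⟩
  rcases values_foldl_insert _ _ _ hAval with hcon | hcon
  · exact absurd hcon (by simp [PySem.Dict.values, PySem.Dict.empty])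
  · have := ((PySem.List.sorted2_perm
      ((scanA (S ++ [("index", "reasons only")])).map (fun p => (p.2, p.1)))
      Prod.fst Prod.snd false).map Prod.snd).mem_iff.mp hcon
    rw [List.map_map] at this
    obtain ⟨p, hp, hpe⟩ := List.mem_map.mp this
    exact hscan_ne p hp hpe

-- ===== VERDICT (by name: the statement is the Claim_ definition above) =====
theorem duplicate_remover_spec : Claim_unchanged_duplicate_remover := by
  intro l _ hnd
  exact main_eq l hnd

theorem duplicate_remover_changed : Claim_changed_duplicate_remover := by
  unfold Claim_changed_duplicate_remover; decide

theorem duplicate_remover_tight : Claim_exact_duplicate_remover := by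
  intro l _ hd
  exact main_ne l hd
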